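-- pv_equiv track=rewrite | github.com/wwan13/algorithm | python/boj_2002.py | solution
-- ===== SOURCE A (Python) =====
-- from collections import deque
--
-- def solution(n, ternel_in, ternel_out):
--     answer = 0
--     cars_in_queue = deque(ternel_in)
--
--     for i in range(0, n):
--         target = ternel_out[i]
--
--         if target == cars_in_queue[0]:
--             cars_in_queue.popleft()
--             continue
--
--         cars_in_queue.remove(target)
--         answer += 1
--
--     return answer
-- ===== SOURCE B (Python) =====
-- def solution(n, ternel_in, ternel_out):
--     removed = set()
--     it = 0
--     answer = 0
--     for i in range(n):
--         target = ternel_out[i]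
--         while it < len(ternel_in) and ternel_in[it] in removed:
--             it += 1
--         if it < len(ternel_in) and ternel_in[it] == target:
--             it += 1
--         else:
--             removed.add(target)
--             answer += 1
--     return answer
-- ===== Notes on version B (the rewrite author's own statement) =====
-- stated objective: alternative
-- what changed: B replaces A's mutable deque simulation (popleft / deque.remove per exit) by a forward pointer over ternel_in plus a set of out-of-order exits, avoiding the per-exit linear deque.remove (amortized O(n) scan vs A's worst-case quadratic removes, though A is also linear on in-order traffic).
-- outside the precondition, e.g. on solution(3, ['a', 'b', 'b'], ['b', 'a', 'b']): A returns 1, B returns 2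
import Mathlib
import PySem

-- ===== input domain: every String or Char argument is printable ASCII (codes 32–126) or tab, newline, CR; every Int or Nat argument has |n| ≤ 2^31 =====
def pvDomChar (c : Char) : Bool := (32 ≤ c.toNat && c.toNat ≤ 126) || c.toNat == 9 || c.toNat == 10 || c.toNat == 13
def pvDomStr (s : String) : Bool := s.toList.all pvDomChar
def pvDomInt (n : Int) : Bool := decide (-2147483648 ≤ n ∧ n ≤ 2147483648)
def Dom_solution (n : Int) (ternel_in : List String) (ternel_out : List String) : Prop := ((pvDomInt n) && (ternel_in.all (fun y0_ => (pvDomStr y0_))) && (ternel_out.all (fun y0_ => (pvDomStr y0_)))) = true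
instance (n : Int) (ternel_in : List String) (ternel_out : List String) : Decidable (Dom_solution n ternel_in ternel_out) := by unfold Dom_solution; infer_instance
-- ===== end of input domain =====

-- B replaces A's deque simulation (popleft / deque.remove per exit) by a forward pointer over
-- ternel_in plus a set of out-of-order exits; equivalence is about return values only
-- (A consumes a deque copy, neither mutates its arguments).

-- ===== PORT A =====
-- the 'for i in range(0, n)' loop of A: fuel = remaining iterations, i = current index,
-- q = cars_in_queue, ans = answer; 'none' cases are Python exceptions (IndexError / ValueError),
-- excluded by Pre_solution, where the port just returns the accumulator (value irrelevant there)
def solutionLoopA : Nat → Nat → List String → List String → Int → Int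
  | 0, _, _, _, ans => ans
  | k+1, i, out, q, ans =>
    match PySem.List.pyGet? out (i : Int) with
    | none => ans                                    -- ternel_out[i] → IndexError
    | some target =>
      match q with
      | [] => ans                                    -- cars_in_queue[0] → IndexError
      | h :: rest =>
        if target == h then solutionLoopA k (i+1) out rest ans
        else
          match PySem.List.remove? q target with
          | none => ans                              -- deque.remove → ValueError
          | some q' => solutionLoopA k (i+1) out q' (ans + 1)

def solution (n : Int) (ternel_in : List String) (ternel_out : List String) : Int :=
  solutionLoopA n.toNat 0 ternel_out ternel_in 0

-- ===== PORT B =====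
-- the 'while it < len(ternel_in) and ternel_in[it] in removed: it += 1' loop of B
def solutionAdvanceB (tin : List String) (removed : PySem.Set String) (it : Nat) : Nat :=
  if h : it < tin.length then
    if removed.contains tin[it] then solutionAdvanceB tin removed (it+1) else it
  else it
  termination_by tin.length - it

-- the 'for i in range(n)' loop of B: fuel = remaining iterations, i = current index,
-- state (removed, it, answer); 'none' = IndexError on ternel_out[i], excluded by Pre_solution
def solutionLoopB (tin : List String) : Nat → Nat → List String → PySem.Set String → Nat → Int → Int
  | 0, _, _, _, _, ans => ans
  | k+1, i, out, removed, it, ans =>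
    match PySem.List.pyGet? out (i : Int) with
    | none => ans
    | some target =>
      let it' := solutionAdvanceB tin removed it
      if h : it' < tin.length then
        if tin[it'] == target then solutionLoopB tin k (i+1) out removed (it'+1) ans
        else solutionLoopB tin k (i+1) out (PySem.Set.add removed target) it' (ans + 1)
      else solutionLoopB tin k (i+1) out (PySem.Set.add removed target) it' (ans + 1)

def solution_alt (n : Int) (ternel_in : List String) (ternel_out : List String) : Int :=
  solutionLoopB ternel_in n.toNat 0 ternel_out PySem.Set.empty 0 0

-- ===== PRECONDITION & SPEC =====
-- Pre_ excludes (a) the inputs where A raises: n > len(ternel_out) (IndexError on ternel_out[i]),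
-- a first-n exit absent from ternel_in or repeated there (ValueError/IndexError on an emptied or
-- exhausted queue), and (b) when the loop actually runs (0 < n), lists ternel_in with duplicate car
-- names, on which A's deque.remove-first-occurrence choice is accidental.
def Pre_solution (n : Int) (ternel_in : List String) (ternel_out : List String) : Prop :=
  n ≤ (ternel_out.length : Int) ∧
  (n ≤ 0 ∨ (ternel_in.Nodup ∧ (ternel_out.take n.toNat).Nodup ∧
    ∀ t ∈ ternel_out.take n.toNat, t ∈ ternel_in))
instance (n : Int) (ternel_in : List String) (ternel_out : List String) : Decidable (Pre_solution n ternel_in ternel_out) := by unfold Pre_solution; infer_instance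

def pvWitness_solution : Int × List String × List String := (3, ["a", "b", "c"], ["b", "a", "c"])

def Spec_solution (n : Int) (ternel_in : List String) (ternel_out : List String) (out : Int) : Prop := out = solution_alt n ternel_in ternel_out
instance (n : Int) (ternel_in : List String) (ternel_out : List String) (out : Int) : Decidable (Spec_solution n ternel_in ternel_out out) := by unfold Spec_solution; infer_instance

-- ===== CLAIM (what is proved, stated in full; the proofs are below) =====
def Claim_equal_solution : Prop := ∀ (n : Int) (ternel_in : List String) (ternel_out : List String), Dom_solution n ternel_in ternel_out → Pre_solution n ternel_in ternel_out → Spec_solution n ternel_in ternel_out (solution n ternel_in ternel_out)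

-- ===== LEMMAS AND PROOFS =====

-- the queue-membership predicate of B's state: car c has not been marked removed
def notRem (removed : PySem.Set String) (c : String) : Bool := !(PySem.Set.contains removed c)

-- B's loop, re-expressed over the list of processed targets
def solutionListB (tin : List String) : List String → PySem.Set String → Nat → Int → Int
  | [], _, _, ans => ans
  | target :: rest, removed, it, ans =>
    let it' := solutionAdvanceB tin removed it
    if h : it' < tin.length then
      if tin[it'] == target then solutionListB tin rest removed (it'+1) ans
      else solutionListB tin rest (PySem.Set.add removed target) it' (ans + 1)
    else solutionListB tin rest (PySem.Set.add removed target) it' (ans + 1)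

lemma solutionLoopB_eq_list (tin : List String) (k : Nat) :
    ∀ (i : Nat) (out removed : List String) (it : Nat) (ans : Int),
    solutionLoopB tin k i out removed it ans
      = solutionListB tin ((out.drop i).take k) removed it ans := by
  induction k with
  | zero => intro i out removed it ans; simp [solutionLoopB, solutionListB]
  | succ k ih =>
    intro i out removed it ans
    by_cases hi : i < out.length
    · rw [List.drop_eq_getElem_cons hi]
      simp only [List.take_succ_cons, solutionLoopB, solutionListB,
        PySem.List.pyGet?_natCast, List.getElem?_eq_getElem hi]
      split
      · split
        · exact ih (i+1) out removed _ ans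
        · exact ih (i+1) out _ _ (ans+1)
      · exact ih (i+1) out _ _ (ans+1)
    · have h1 : out.drop i = [] := List.drop_eq_nil_of_le (by omega)
      simp [solutionLoopB, solutionListB, h1, PySem.List.pyGet?_natCast,
        List.getElem?_eq_none (by omega : out.length ≤ i)]

-- A's loop, re-expressed over the list of processed targets (ternel_out[i] for i = 0..n-1)
def solutionListA : List String → List String → Int → Int
  | [], _, ans => ans
  | target :: rest, q, ans =>
    match q with
    | [] => ans
    | h :: _ =>
      if target == h then solutionListA rest (q.tail) ans
      else
        match PySem.List.remove? q target with
        | none => ans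
        | some q' => solutionListA rest q' (ans + 1)

lemma solutionLoopA_eq_list (k : Nat) : ∀ (i : Nat) (out q : List String) (ans : Int),
    solutionLoopA k i out q ans = solutionListA ((out.drop i).take k) q ans := by
  induction k with
  | zero => intro i out q ans; simp [solutionLoopA, solutionListA]
  | succ k ih =>
    intro i out q ans
    by_cases hi : i < out.length
    · rw [List.drop_eq_getElem_cons hi]
      simp only [List.take_succ_cons, solutionLoopA, solutionListA,
        PySem.List.pyGet?_natCast, List.getElem?_eq_getElem hi]
      match q with
      | [] => rfl
      | h :: rest =>
        simp only [List.tail_cons]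
        split
        · exact ih (i+1) out rest ans
        · cases hrem : PySem.List.remove? (h :: rest) (out[i]) with
          | none => rfl
          | some q' => exact ih (i+1) out q' (ans+1)
    · have h1 : out.drop i = [] := List.drop_eq_nil_of_le (by omega)
      simp [solutionLoopA, solutionListA, h1, PySem.List.pyGet?_natCast,
        List.getElem?_eq_none (by omega : out.length ≤ i)]

lemma solutionAdvanceB_filter (tin removed : List String) (it : Nat) :
    (tin.drop (solutionAdvanceB tin removed it)).filter (notRem removed)
      = (tin.drop it).filter (notRem removed) := by
  fun_induction solutionAdvanceB tin removed it with
  | case1 it h hc ih =>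
    rw [ih, List.drop_eq_getElem_cons h,
      List.filter_cons_of_neg (by simp [notRem]; simpa [PySem.Set.contains] using hc)]
  | case2 => rfl
  | case3 => rfl

lemma solutionAdvanceB_not_removed (tin removed : List String) (it : Nat)
    (h : solutionAdvanceB tin removed it < tin.length) :
    PySem.Set.contains removed (tin[solutionAdvanceB tin removed it]'h) = false := by
  fun_induction solutionAdvanceB tin removed it with
  | case1 it h' hc ih => exact ih h
  | case2 it h' hc => simpa using hc
  | case3 it h' => omega

-- the central invariant: A's queue equals tin from B's pointer on, minus B's removed set
lemma solution_loop_agree (tin : List String) (htin : tin.Nodup) :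
    ∀ (ts removed : List String) (it : Nat) (ans : Int),
    ts.Nodup →
    (∀ t ∈ ts, t ∈ (tin.drop it).filter (notRem removed)) →
    solutionListA ts ((tin.drop it).filter (notRem removed)) ans
      = solutionListB tin ts removed it ans := by
  intro ts
  induction ts with
  | nil => intro removed it ans _ _; simp [solutionListA, solutionListB]
  | cons target rest ih =>
    intro removed it ans hnd hmem
    have hndr := List.nodup_cons.mp hnd
    have hfil := solutionAdvanceB_filter tin removed it
    rw [← hfil] at hmem ⊢
    set it' := solutionAdvanceB tin removed it with hit'
    set q := (tin.drop it').filter (notRem removed) with hqdef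
    have hmemt : target ∈ q := hmem target (by simp)
    have hlt : it' < tin.length := by
      by_contra h
      have hd : tin.drop it' = [] := List.drop_eq_nil_of_le (by omega)
      rw [hqdef, hd] at hmemt; simp at hmemt
    have hnr := solutionAdvanceB_not_removed tin removed it hlt
    have hq : q = tin[it'] :: (tin.drop (it'+1)).filter (notRem removed) := by
      rw [hqdef, List.drop_eq_getElem_cons hlt,
        List.filter_cons_of_pos (by simp [notRem]; simpa [PySem.Set.contains] using hnr)]
    -- unfold one step of B
    rw [show solutionListB tin (target :: rest) removed it ans
        = if h : it' < tin.length then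
            if tin[it'] == target then solutionListB tin rest removed (it'+1) ans
            else solutionListB tin rest (PySem.Set.add removed target) it' (ans + 1)
          else solutionListB tin rest (PySem.Set.add removed target) it' (ans + 1)
      from by rw [solutionListB]]
    rw [dif_pos hlt]
    by_cases heq : target = tin[it']
    · -- front of the queue exits: both pop
      rw [if_pos (by simp [heq])]
      rw [hq]
      show (if target == tin[it'] then
          solutionListA rest ((tin.drop (it'+1)).filter (notRem removed)) ans
        else _) = _
      rw [if_pos (by simp [heq])]
      apply ih removed (it'+1) ans hndr.2
      intro t ht
      have h1 : t ∈ q := hmem t (List.mem_cons_of_mem _ ht)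
      rw [hq] at h1
      rcases List.mem_cons.mp h1 with h2 | h2
      · exact absurd (by rw [show target = t from heq.trans h2.symm]; exact ht) hndr.1
      · exact h2
    · -- an overtaking car exits from the middle: A erases it, B marks it removed
      have htnr : PySem.Set.contains removed target = false := by
        have := List.of_mem_filter hmemt
        simpa [notRem] using this
      have htm : target ∉ removed := by simpa [PySem.Set.contains] using htnr
      have hadd : PySem.Set.add removed target = removed ++ [target] := by
        simp [PySem.Set.add, PySem.Set.contains, htm]
      have hqnd : q.Nodup := (htin.sublist (List.drop_sublist it' tin)).sublist
        List.filter_sublist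
      have herase : q.erase target = (tin.drop it').filter (notRem (PySem.Set.add removed target)) := by
        rw [hqdef, List.Nodup.erase_eq_filter hqnd target, List.filter_filter]
        apply List.filter_congr
        intro x _
        by_cases hx : x = target <;> simp [notRem, hadd, PySem.Set.contains, hx]
      rw [if_neg (by simp; exact fun h => heq h.symm)]
      rw [hq]
      show (if target == tin[it'] then _
        else match PySem.List.remove? (tin[it'] :: (tin.drop (it'+1)).filter (notRem removed)) target with
          | none => ans
          | some q' => solutionListA rest q' (ans + 1)) = _
      rw [if_neg (by simp [heq])]
      rw [show tin[it'] :: (tin.drop (it'+1)).filter (notRem removed) = q from hq.symm]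
      rw [PySem.List.remove?_eq_some_erase q target hmemt]
      show solutionListA rest (q.erase target) (ans + 1)
        = solutionListB tin rest (PySem.Set.add removed target) it' (ans + 1)
      rw [herase]
      apply ih (PySem.Set.add removed target) it' (ans+1) hndr.2
      intro t ht
      rw [← herase]
      have h1 : t ∈ q := hmem t (List.mem_cons_of_mem _ ht)
      exact (List.mem_erase_of_ne (fun h => hndr.1 (by rw [← h]; exact ht))).mpr h1

-- ===== VERDICT (by name: the statement is the Claim_ definition above) =====
theorem solution_spec : Claim_equal_solution := by
  intro n tin tout _ hpre
  obtain ⟨hnlen, hrest⟩ := hpre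
  unfold Spec_solution solution solution_alt
  rcases hrest with hn0 | ⟨htin, houtnd, houtmem⟩
  · have h0 : n.toNat = 0 := by omega
    simp [h0, solutionLoopA, solutionLoopB]
  · rw [solutionLoopA_eq_list n.toNat 0 tout tin 0,
      solutionLoopB_eq_list tin n.toNat 0 tout PySem.Set.empty 0 0]
    simp only [List.drop_zero]
    have h := solution_loop_agree tin htin (tout.take n.toNat) PySem.Set.empty 0 0 houtnd
      (by intro t ht; simpa [notRem, PySem.Set.empty, PySem.Set.contains] using houtmem t ht)
    have hfid : List.filter (notRem PySem.Set.empty) tin = tin := by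
      simp [notRem, PySem.Set.empty, PySem.Set.contains]
    rw [List.drop_zero, hfid] at h
    exact h
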